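-- pv_equiv track=rewrite | github.com/xwmtp/AdventOfCode2019 | Day19/Day19.py | find_fit
-- ===== SOURCE A (Python) =====
-- def beam_start(row):
--     return row + 1 + (row - 1)//12
--
-- def beam_end(row):
--     return row + (row)//3
--
-- def find_fit(ship_size):
--     row = 0
--     while True:
--         ship_top_left_x = beam_end(row) - ship_size + 1
--         bottom_fits = beam_start(row+ship_size-1) == ship_top_left_x
--         if bottom_fits:
--             return ship_top_left_x, row
--         row += 1
-- ===== SOURCE B (Python) =====
-- def find_fit(ship_size):
--     # Closed form: the first fitting row advances by 75 every 9 ship sizes,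
--     # following the fixed in-period offsets 9*k - 3*(k//5).
--     q, k = divmod(ship_size - 1, 9)
--     row = 75 * q + 9 * k - 3 * (k // 5)
--     return row + row // 3 - ship_size + 1, row
-- ===== Notes on version B (the rewrite author's own statement) =====
-- stated objective: faster
-- what changed: Replaces the unbounded row-by-row search with an O(1) closed-form formula for the first fitting row (period 75 per 9 ship sizes); Pre_ excludes ship_size <= 0, where A's while-loop never terminates.
-- outside the precondition, e.g. on find_fit(0): A does not finish within the time limit, B returns (-7, -6)
import Mathlib
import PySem

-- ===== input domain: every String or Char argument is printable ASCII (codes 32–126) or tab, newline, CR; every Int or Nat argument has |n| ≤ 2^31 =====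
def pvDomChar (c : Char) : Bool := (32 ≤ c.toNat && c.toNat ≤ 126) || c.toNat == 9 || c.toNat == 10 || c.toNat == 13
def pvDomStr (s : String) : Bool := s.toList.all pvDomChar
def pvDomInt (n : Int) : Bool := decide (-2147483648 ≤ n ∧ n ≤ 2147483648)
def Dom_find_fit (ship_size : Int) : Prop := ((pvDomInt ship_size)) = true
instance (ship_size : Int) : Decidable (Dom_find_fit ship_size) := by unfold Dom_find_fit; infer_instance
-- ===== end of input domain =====

-- B replaces A's unbounded linear scan by an O(1) closed-form formula for the first fitting row.

-- ===== PORT A =====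
def beam_start (row : Int) : Int := row + 1 + PySem.Int.floordiv (row - 1) 12

def beam_end (row : Int) : Int := row + PySem.Int.floordiv row 3

-- the 'while True' loop; fuel only makes it total (enough fuel is supplied under Pre_)
def find_fitLoop (ship_size : Int) : Nat → Int → Int × Int
  | 0, _row => (0, 0)
  | fuel+1, row =>
    let ship_top_left_x := beam_end row - ship_size + 1
    if beam_start (row + ship_size - 1) == ship_top_left_x then (ship_top_left_x, row)
    else find_fitLoop ship_size fuel (row + 1)

def find_fit (ship_size : Int) : Int × Int :=
  find_fitLoop ship_size (9 * ship_size).toNat 0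

-- ===== PORT B =====
def find_fit_alt (ship_size : Int) : Int × Int :=
  let q := PySem.Int.floordiv (ship_size - 1) 9
  let k := PySem.Int.mod (ship_size - 1) 9
  let row := 75 * q + 9 * k - 3 * PySem.Int.floordiv k 5
  (row + PySem.Int.floordiv row 3 - ship_size + 1, row)

-- ===== PRECONDITION & SPEC =====
-- A's while-loop never terminates for ship_size ≤ 0 (the fit equality never holds there),
-- so Pre_ admits exactly the inputs on which the Python A returns.
def Pre_find_fit (ship_size : Int) : Prop := 1 ≤ ship_size
instance (ship_size : Int) : Decidable (Pre_find_fit ship_size) := by unfold Pre_find_fit; infer_instance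
def pvWitness_find_fit : Int := (3)

def Spec_find_fit (ship_size : Int) (out : Int × Int) : Prop := out = find_fit_alt ship_size
instance (ship_size : Int) (out : Int × Int) : Decidable (Spec_find_fit ship_size out) := by unfold Spec_find_fit; infer_instance

-- ===== CLAIM (what is proved, stated in full; the proofs are below) =====
def Claim_equal_find_fit : Prop := ∀ (ship_size : Int), Dom_find_fit ship_size → Pre_find_fit ship_size → Spec_find_fit ship_size (find_fit ship_size)

-- ===== LEMMAS AND PROOFS =====

lemma fdiv_pos_eq (a : Int) (b : Int) (hb : 0 < b) : PySem.Int.floordiv a b = a / b :=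
  PySem.Int.floordiv_eq_ediv_of_pos hb

lemma mod_pos_eq (a : Int) (b : Int) (hb : 0 < b) : PySem.Int.mod a b = a % b :=
  PySem.Int.mod_eq_emod_of_pos hb

-- if the loop condition first holds after exactly j more rows, the loop returns that row
lemma find_fitLoop_eq (s : Int) :
    ∀ (n j : Nat) (row : Int), j < n →
    beam_start (row + j + s - 1) = beam_end (row + j) - s + 1 →
    (∀ i : Nat, i < j → ¬ (beam_start (row + i + s - 1) = beam_end (row + i) - s + 1)) →
    find_fitLoop s n row = (beam_end (row + j) - s + 1, row + j) := by
  intro n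
  induction n with
  | zero => intro j row hj _ _; exact absurd hj (Nat.not_lt_zero j)
  | succ m ih =>
    intro j row hj hcond hmiss
    cases j with
    | zero =>
      have hb : (beam_start (row + s - 1) == beam_end row - s + 1) = true := by
        rw [beq_iff_eq]
        simpa using hcond
      simp [find_fitLoop, hb]
    | succ p =>
      have hb : (beam_start (row + s - 1) == beam_end row - s + 1) = false := by
        rw [beq_eq_false_iff_ne]
        have := hmiss 0 (Nat.succ_pos p)
        simpa using this
      have hrow : row + 1 + (p : Int) = row + ((p + 1 : Nat) : Int) := by push_cast; ring
      have hcond' : beam_start (row + 1 + p + s - 1) = beam_end (row + 1 + p) - s + 1 := by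
        rw [hrow]; exact hcond
      have hmiss' : ∀ i : Nat, i < p →
          ¬ (beam_start (row + 1 + i + s - 1) = beam_end (row + 1 + i) - s + 1) := by
        intro i hi
        have hcast : row + 1 + (i : Int) = row + ((i + 1 : Nat) : Int) := by push_cast; ring
        rw [hcast]
        exact hmiss (i + 1) (by omega)
      have := ih p (row + 1) (by omega) hcond' hmiss'
      rw [hrow] at this
      simp [find_fitLoop, hb]
      simpa using this

-- ===== VERDICT (by name: the statement is the Claim_ definition above) =====
theorem find_fit_spec : Claim_equal_find_fit := by
  intro s _ hpre
  unfold Spec_find_fit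
  have h1 : (1 : Int) ≤ s := hpre
  set r : Int := 75 * ((s - 1) / 9) + 9 * ((s - 1) % 9) - 3 * (((s - 1) % 9) / 5) with hrdef
  have hr0 : 0 ≤ r := by omega
  have hB : find_fit_alt s = (r + r / 3 - s + 1, r) := by
    simp only [find_fit_alt, fdiv_pos_eq _ 9 (by norm_num), fdiv_pos_eq _ 5 (by norm_num),
      fdiv_pos_eq _ 3 (by norm_num), mod_pos_eq _ 9 (by norm_num)]
    rw [← hrdef]
  have hcast : ((r.toNat : Int)) = r := Int.toNat_of_nonneg hr0
  have hcond : beam_start ((0 : Int) + r.toNat + s - 1) = beam_end ((0 : Int) + r.toNat) - s + 1 := by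
    simp only [beam_start, beam_end, fdiv_pos_eq _ 12 (by norm_num), fdiv_pos_eq _ 3 (by norm_num),
      hcast]
    omega
  have hmiss : ∀ i : Nat, i < r.toNat →
      ¬ (beam_start ((0 : Int) + i + s - 1) = beam_end ((0 : Int) + i) - s + 1) := by
    intro i hi
    simp only [beam_start, beam_end, fdiv_pos_eq _ 12 (by norm_num), fdiv_pos_eq _ 3 (by norm_num)]
    omega
  have hfuel : r.toNat < (9 * s).toNat := by omega
  have hA := find_fitLoop_eq s ((9 * s).toNat) r.toNat 0 hfuel hcond hmiss
  rw [find_fit, hA, hB]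
  simp only [beam_end, fdiv_pos_eq _ 3 (by norm_num), zero_add, hcast]
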